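-- pv_equiv track=rewrite | github.com/YehezkielDarren/Teori-PrakAlPro | Pertemuan_10/setengah_reverse.py | setengah_reverse
-- ===== SOURCE A (Python) =====
-- def setengah_reverse(kalimat:str):
--     kalimat=kalimat.split()
--     awal,akhir=[],[]
--     for i in range(len(kalimat)):
--         if i >= int(len(kalimat)//2):
--             akhir.append(kalimat[i])
--         else:
--             awal.append(kalimat[i])
--     a,b,jawaban=-1,0,[] #a untuk indeks awal dan b untuk indeks akhir
--     for i in range(len(awal)+len(akhir)):
--         if i %2==0:
--             jawaban.append(akhir[b])
--             b+=1
--         else: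
--             jawaban.append(awal[a][-1::-1])
--             a-=1
--     return " ".join((jawaban))
-- ===== SOURCE B (Python) =====
-- def _interleave(xs, ys):
--     if not xs:
--         return []
--     if not ys:
--         return list(xs)
--     return [xs[0], ys[0]] + _interleave(xs[1:], ys[1:])
--
--
-- def setengah_reverse(kalimat: str):
--     words = kalimat.split()
--     mid = len(words) // 2
--     second = words[mid:]
--     first_rev = [w[::-1] for w in reversed(words[:mid])]
--     return " ".join(_interleave(second, first_rev))
-- ===== Notes on version B (the rewrite author's own statement) =====
-- stated objective: simpler
-- what changed: Replaces A's two index-driven loops (a %2-parity loop walking a negative pointer a and a forward pointer b) with a direct decomposition: slice the halves, reverse-and-string-reverse the first half once, and interleave the two lists by structural recursion.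
import Mathlib
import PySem

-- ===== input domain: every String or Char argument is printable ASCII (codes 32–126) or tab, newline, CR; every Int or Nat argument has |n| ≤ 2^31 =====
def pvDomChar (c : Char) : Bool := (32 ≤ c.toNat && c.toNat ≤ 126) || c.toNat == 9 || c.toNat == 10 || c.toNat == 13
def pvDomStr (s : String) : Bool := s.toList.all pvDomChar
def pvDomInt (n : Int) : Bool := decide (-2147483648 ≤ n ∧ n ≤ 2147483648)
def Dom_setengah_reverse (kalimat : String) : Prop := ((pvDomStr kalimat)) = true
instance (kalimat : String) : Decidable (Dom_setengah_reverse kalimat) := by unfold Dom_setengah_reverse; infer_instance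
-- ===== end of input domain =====

-- B replaces A's two index-pointer loops (parity branch, negative pointer a, forward pointer b)
-- by slicing the halves, reversing the first half once, and interleaving by structural recursion;
-- objective: simpler.


-- ===== PORT A =====
-- literal transliteration of A: split, one loop distributing words into awal/akhir by index,
-- one loop over all indices appending akhir[b] on even i and awal[a][-1::-1] on odd i.
-- (pyGetD/"": every index A forms is in range, so the default is never read; Python A is total.)
def setengah_reverse (kalimat : String) : String :=
  let kal := PySem.Str.split₀ kalimat
  let aw_ak :=
    (PySem.List.pyRange 0 (PySem.List.len kal)).foldl
      (fun (st : List String × List String) i =>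
        if i ≥ PySem.Int.floordiv (PySem.List.len kal) 2 then
          (st.1, st.2 ++ [PySem.List.pyGetD kal i ""])
        else
          (st.1 ++ [PySem.List.pyGetD kal i ""], st.2))
      ([], [])
  let awal := aw_ak.1
  let akhir := aw_ak.2
  let fin :=
    (PySem.List.pyRange 0 (PySem.List.len awal + PySem.List.len akhir)).foldl
      (fun (st : Int × Int × List String) i =>
        if PySem.Int.mod i 2 = 0 then
          (st.1, st.2.1 + 1, st.2.2 ++ [PySem.List.pyGetD akhir st.2.1 ""])
        else
          (st.1 - 1, st.2.1,
            st.2.2 ++ [(PySem.Str.slice? (PySem.List.pyGetD awal st.1 "") (some (-1)) none (-1)).getD ""]))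
      (-1, 0, ([] : List String))
  PySem.Str.join " " fin.2.2

-- ===== PORT B =====
-- transliteration of Source B's recursive _interleave
def pvInterleave : List String → List String → List String
  | [], _ => []
  | x :: xs, [] => x :: xs
  | x :: xs, y :: ys => x :: y :: pvInterleave xs ys

def setengah_reverse_alt (kalimat : String) : String :=
  let words := PySem.Str.split₀ kalimat
  let mid := PySem.Int.floordiv (PySem.List.len words) 2
  let second := PySem.List.slice words (some mid) none
  let firstRev := (PySem.List.slice words none (some mid)).reverse.map
    (fun w => (PySem.Str.slice? w none none (-1)).getD "")
  PySem.Str.join " " (pvInterleave second firstRev)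

-- ===== PRECONDITION & SPEC =====
def Spec_setengah_reverse (kalimat : String) (out : String) : Prop := out = setengah_reverse_alt kalimat
instance (kalimat : String) (out : String) : Decidable (Spec_setengah_reverse kalimat out) := by unfold Spec_setengah_reverse; infer_instance

-- ===== CLAIM (what is proved, stated in full; the proofs are below) =====
def Claim_equal_setengah_reverse : Prop := ∀ (kalimat : String), Dom_setengah_reverse kalimat → Spec_setengah_reverse kalimat (setengah_reverse kalimat)

-- ===== LEMMAS AND PROOFS =====

-- A's w[-1::-1] is full string reversal (start -1, step -1 walks the whole string).
theorem str_slice_neg_one_rev (s : String) :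
    PySem.Str.slice? s (some (-1)) none (-1) = some (String.ofList s.toList.reverse) := by
  have h : ∀ n : Nat, PySem.List.sliceIndices n (some (-1)) none (-1)
      = PySem.List.sliceIndices n none none (-1) := by
    intro n; simp [PySem.List.sliceIndices]; omega
  have h2 : PySem.List.slice? s.toList (some (-1)) none (-1)
      = PySem.List.slice? s.toList none none (-1) := by
    simp [PySem.List.slice?, h]
  simp [PySem.Str.slice?, PySem.Chars.slice?, h2, PySem.List.slice?_none_none_neg_one]

-- loop 1: a fold that only appends to the first component
theorem fold1_lt (kal : List String) (m : Int) (r : List Int) (h : ∀ i ∈ r, ¬ i ≥ m)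
    (aw ak : List String) :
    r.foldl (fun (st : List String × List String) i =>
        if i ≥ m then (st.1, st.2 ++ [PySem.List.pyGetD kal i ""])
        else (st.1 ++ [PySem.List.pyGetD kal i ""], st.2)) (aw, ak)
      = (aw ++ r.map (fun i => PySem.List.pyGetD kal i ""), ak) := by
  induction r generalizing aw with
  | nil => simp
  | cons x xs ih =>
      have hx : ¬ x ≥ m := h x (by simp)
      simp only [List.foldl_cons, List.map_cons, if_neg hx]
      rw [ih (fun i hi => h i (by simp [hi]))]
      simp

-- loop 1: a fold that only appends to the second component
theorem fold1_ge (kal : List String) (m : Int) (r : List Int) (h : ∀ i ∈ r, i ≥ m)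
    (aw ak : List String) :
    r.foldl (fun (st : List String × List String) i =>
        if i ≥ m then (st.1, st.2 ++ [PySem.List.pyGetD kal i ""])
        else (st.1 ++ [PySem.List.pyGetD kal i ""], st.2)) (aw, ak)
      = (aw, ak ++ r.map (fun i => PySem.List.pyGetD kal i "")) := by
  induction r generalizing ak with
  | nil => simp
  | cons x xs ih =>
      have hx : x ≥ m := h x (by simp)
      simp only [List.foldl_cons, List.map_cons, if_pos hx]
      rw [ih (fun i hi => h i (by simp [hi]))]
      simp

-- loop 1 computes (take m, drop m)
theorem loop1_eq (kal : List String) (m : Nat) (hm : m ≤ kal.length) :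
    (PySem.List.pyRange 0 (PySem.List.len kal)).foldl
      (fun (st : List String × List String) i =>
        if i ≥ (m : Int) then (st.1, st.2 ++ [PySem.List.pyGetD kal i ""])
        else (st.1 ++ [PySem.List.pyGetD kal i ""], st.2)) ([], [])
      = (kal.take m, kal.drop m) := by
  have hsplit : PySem.List.pyRange 0 (PySem.List.len kal)
      = PySem.List.pyRange 0 (m : Int) ++ PySem.List.pyRange (m : Int) (PySem.List.len kal) := by
    exact PySem.List.pyRange_one_append 0 (m : Int) (PySem.List.len kal)
      (by omega) (by simp only [PySem.List.len]; omega)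
  rw [hsplit, List.foldl_append]
  rw [fold1_lt kal (m : Int) (PySem.List.pyRange 0 (m : Int)) (fun i hi => by
        have := (PySem.List.mem_pyRange_one.mp hi).2; omega)]
  rw [fold1_ge kal (m : Int) _ (fun i hi => (PySem.List.mem_pyRange_one.mp hi).1)]
  have hmap := PySem.List.map_pyGetD_pyRange_zero kal ""
  rw [hsplit, List.map_append] at hmap
  have hlen : ((PySem.List.pyRange 0 (m : Int)).map
      (fun i => PySem.List.pyGetD kal i "")).length = (kal.take m).length := by
    simp [PySem.List.length_pyRange_one, hm]
  obtain ⟨h1, h2⟩ := List.append_inj (hmap.trans (List.take_append_drop m kal).symm) hlen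
  simp only [PySem.List.len] at h2
  simp [h1, h2]

-- loop 2: from the state after k even/odd pairs, the fold produces the interleaving of the
-- remaining suffixes of akhir and of the reversed-word list of awal.
theorem loop2_eq (awal akhir : List String) (d : Nat)
    (hpq : awal.length ≤ akhir.length) (hqp : akhir.length ≤ awal.length + 1) :
    ∀ (k : Nat) (jaw : List String), k ≤ awal.length → d = akhir.length - k →
    ((PySem.List.pyRange (2 * (k : Int)) ((awal.length : Int) + (akhir.length : Int))).foldl
      (fun (st : Int × Int × List String) i =>
        if PySem.Int.mod i 2 = 0 then
          (st.1, st.2.1 + 1, st.2.2 ++ [PySem.List.pyGetD akhir st.2.1 ""])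
        else
          (st.1 - 1, st.2.1,
            st.2.2 ++ [(PySem.Str.slice? (PySem.List.pyGetD awal st.1 "") (some (-1)) none (-1)).getD ""]))
      (-1 - (k : Int), (k : Int), jaw)).2.2
      = jaw ++ pvInterleave (akhir.drop k)
          ((awal.reverse.map (fun w => (PySem.Str.slice? w none none (-1)).getD "")).drop k) := by
  induction d with
  | zero =>
      intro k jaw hk hd
      have hkq : k = akhir.length := by omega
      have hkp : k = awal.length := by omega
      rw [PySem.List.pyRange_one_eq_nil (by omega)]
      have h1 : akhir.drop k = [] := List.drop_of_length_le (by omega)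
      have h2 : ((awal.reverse.map (fun w => (PySem.Str.slice? w none none (-1)).getD "")).drop k)
          = [] := List.drop_of_length_le (by simp only [List.length_map, List.length_reverse]; omega)
      simp [h1, pvInterleave]
  | succ d ih =>
      intro k jaw hk hd
      have hkq : k < akhir.length := by omega
      have hEven : PySem.Int.mod (2 * (k : Int)) 2 = 0 := by simp [PySem.Int.mod]
      have hgetAk : PySem.List.pyGetD akhir (k : Int) "" = akhir[k] := by
        rw [PySem.List.pyGetD_natCast]; exact List.getD_eq_getElem _ _ hkq
      by_cases hlast : awal.length + akhir.length = 2 * k + 1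
      · -- one step remains (odd total length, k = awal.length)
        have hkp : k = awal.length := by omega
        have hone : PySem.List.pyRange (2 * (k : Int)) ((awal.length : Int) + (akhir.length : Int))
            = [2 * (k : Int)] := by
          have : ((awal.length : Int) + (akhir.length : Int)) = 2 * (k : Int) + 1 := by
            omega
          rw [this]; exact PySem.List.pyRange_one_singleton _
        rw [hone]
        simp only [List.foldl_cons, List.foldl_nil, if_pos hEven]
        have hd1 : akhir.drop (k + 1) = [] := List.drop_of_length_le (by omega)
        have hd2 : ((awal.reverse.map (fun w => (PySem.Str.slice? w none none (-1)).getD "")).drop k)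
            = [] := List.drop_of_length_le (by simp only [List.length_map, List.length_reverse]; omega)
        rw [List.drop_eq_getElem_cons hkq, hd1, hd2]
        simp [pvInterleave, hgetAk]
      · -- at least two steps remain
        have hkp : k < awal.length := by omega
        have htwo : PySem.List.pyRange (2 * (k : Int)) ((awal.length : Int) + (akhir.length : Int))
            = 2 * (k : Int) :: (2 * (k : Int) + 1) ::
              PySem.List.pyRange (2 * ((k : Int) + 1)) ((awal.length : Int) + (akhir.length : Int)) := by
          rw [PySem.List.pyRange_one_cons (by omega), PySem.List.pyRange_one_cons (by omega)]
          ring_nf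
        have hOdd : ¬ PySem.Int.mod (2 * (k : Int) + 1) 2 = 0 := by simp [PySem.Int.mod]
        rw [htwo]
        simp only [List.foldl_cons, if_pos hEven, if_neg hOdd]
        have hgetAw : PySem.List.pyGetD awal (-1 - (k : Int)) ""
            = awal[awal.length - (k + 1)] := by
          have : (-1 - (k : Int)) = -((k + 1 : Nat) : Int) := by push_cast; ring
          rw [this, PySem.List.pyGetD_neg_natCast awal (k + 1) "" (by omega) (by omega)]
        have hstate : ((-1 - (k : Int)) - 1) = -1 - ((k : Int) + 1) := by ring
        have hcast : ((k : Int) + 1) = ((k + 1 : Nat) : Int) := by push_cast; ring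
        rw [hgetAw, hstate, hcast]
        rw [ih (k + 1) _ (by omega) (by omega)]
        have hkr : k < (awal.reverse.map
            (fun w => (PySem.Str.slice? w none none (-1)).getD "")).length := by simp [hkp]
        rw [List.drop_eq_getElem_cons hkq, List.drop_eq_getElem_cons hkr]
        simp only [pvInterleave, hgetAk]
        rw [List.getElem_map, List.getElem_reverse, str_slice_neg_one_rev,
            PySem.Str.slice?_none_none_neg_one]
        have hidx : awal.length - (k + 1) = awal.length - 1 - k := by omega
        simp [hidx]

-- ===== VERDICT (by name: the statement is the Claim_ definition above) =====
theorem setengah_reverse_spec : Claim_equal_setengah_reverse := by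
  intro kalimat _
  unfold Spec_setengah_reverse setengah_reverse setengah_reverse_alt
  set words := PySem.Str.split₀ kalimat with hw
  have hfd : PySem.Int.floordiv (PySem.List.len words) 2 = ((words.length / 2 : Nat) : Int) := by
    simp [PySem.List.len]
  simp only [hfd]
  rw [loop1_eq words (words.length / 2) (by omega)]
  rw [PySem.List.slice_from_natCast, PySem.List.slice_to_natCast]
  set m := words.length / 2 with hm
  have hlt : (words.take m).length = m := by simp [hm]; omega
  have hld : (words.drop m).length = words.length - m := by simp
  have h2 := loop2_eq (words.take m) (words.drop m) (words.drop m).length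
    (by omega) (by omega) 0 [] (by omega) (by omega)
  simp only [Nat.cast_zero, mul_zero, List.drop_zero] at h2
  have hz : (-1 - (0 : Int)) = -1 := by ring
  rw [hz] at h2
  simp only [PySem.List.len]
  rw [h2]
  simp
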